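-- pv_equiv track=rewrite | github.com/1230fahid/DS-A | Array/lc/maximumProductSubarray.py | getnegs
-- ===== SOURCE A (Python) =====
-- def getnegs(nums): #returns the first negative that appears in the list, and the last one that appears, as well as the total number of negative numbers in the array
--     neg_nums = 0
--     zeros = {}
--     negatives = {}
--
--     first_negative = None
--     last_negative = None
--     for i in range(0, len(nums)):
--         if nums[i] < 0:
--             if(len(negatives) == 0):
--                 first_negative = i
--             negatives[i] = 0
--             last_negative = i
--             neg_nums += 1 #count how many negative numbers appear
--         elif nums[i] == 0:
--             zeros[i] = 0 #get indexes of where zeros are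
--         #products.append(nums[i]) #get all individual numbers first just in case?
--     return first_negative, last_negative, neg_nums
-- ===== SOURCE B (Python) =====
-- def getnegs(nums):
--     count = sum(1 for x in nums if x < 0)
--     first = next((i for i, x in enumerate(nums) if x < 0), None)
--     last = next((i for i in range(len(nums) - 1, -1, -1) if nums[i] < 0), None)
--     return first, last, count
-- ===== Notes on version B (the rewrite author's own statement) =====
-- stated objective: idiomatic
-- what changed: Replaces A's single fused index loop with dict bookkeeping by three independent idiomatic scans: a generator-sum for the count, a forward enumerate scan for the first negative index, and a backward range scan for the last; the unused zeros/negatives dicts disappear.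
import Mathlib
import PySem

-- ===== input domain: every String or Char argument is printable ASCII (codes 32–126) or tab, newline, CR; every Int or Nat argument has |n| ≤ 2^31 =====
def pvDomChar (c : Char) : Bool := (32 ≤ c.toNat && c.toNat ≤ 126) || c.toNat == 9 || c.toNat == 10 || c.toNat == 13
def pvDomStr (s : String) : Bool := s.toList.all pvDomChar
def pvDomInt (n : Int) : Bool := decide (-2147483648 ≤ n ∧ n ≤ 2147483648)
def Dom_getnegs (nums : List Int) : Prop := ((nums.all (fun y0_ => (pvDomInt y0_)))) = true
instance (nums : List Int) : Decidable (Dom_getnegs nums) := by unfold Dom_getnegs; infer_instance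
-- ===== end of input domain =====

-- B replaces A's single fused index loop (with its unused dict bookkeeping) by three
-- independent idiomatic scans (count, forward first-scan, backward last-scan); return value only.

-- ===== PORT A =====
-- loop state: (neg_nums, zeros, negatives, first_negative, last_negative)
def getnegsStep (nums : List Int)
    (st : Int × PySem.Dict Int Int × PySem.Dict Int Int × Option Int × Option Int)
    (i : Int) : Int × PySem.Dict Int Int × PySem.Dict Int Int × Option Int × Option Int :=
  let (negNums, zeros, negatives, firstNeg, lastNeg) := st
  if PySem.List.pyGetD nums i 0 < 0 then
    let firstNeg := if negatives.size == 0 then some i else firstNeg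
    (negNums + 1, zeros, negatives.insert i 0, firstNeg, some i)
  else if PySem.List.pyGetD nums i 0 == 0 then
    (negNums, zeros.insert i 0, negatives, firstNeg, lastNeg)
  else
    (negNums, zeros, negatives, firstNeg, lastNeg)

def getnegs (nums : List Int) : Option Int × Option Int × Int :=
  let st := (PySem.List.pyRange 0 (PySem.List.len nums) 1).foldl (getnegsStep nums)
      ((0 : Int), PySem.Dict.empty, PySem.Dict.empty, none, none)
  (st.2.2.2.1, st.2.2.2.2, st.1)

-- ===== PORT B =====
def getnegs_alt (nums : List Int) : Option Int × Option Int × Int :=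
  let count : Int := ((nums.filter (fun x => decide (x < 0))).map (fun _ => (1 : Int))).sum
  let firstNeg : Option Int :=
    ((PySem.List.enumerate nums 0).find? (fun p => decide (p.2 < 0))).map (fun p => p.1)
  let lastNeg : Option Int :=
    (PySem.List.pyRange (PySem.List.len nums - 1) (-1) (-1)).find?
      (fun i => decide (PySem.List.pyGetD nums i 0 < 0))
  (firstNeg, lastNeg, count)

-- ===== PRECONDITION & SPEC =====
def Spec_getnegs (nums : List Int) (out : Option Int × Option Int × Int) : Prop := out = getnegs_alt nums
instance (nums : List Int) (out : Option Int × Option Int × Int) : Decidable (Spec_getnegs nums out) := by unfold Spec_getnegs; infer_instance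

-- ===== CLAIM (what is proved, stated in full; the proofs are below) =====
def Claim_equal_getnegs : Prop := ∀ (nums : List Int), Dom_getnegs nums → Spec_getnegs nums (getnegs nums)

-- ===== LEMMAS AND PROOFS =====

theorem items_insert_ne_nil {κ ν : Type} [BEq κ] (d : PySem.Dict κ ν) (k : κ) (v : ν) :
    (d.insert k v).items ≠ [] := by
  rcases d with ⟨items⟩
  cases items <;> simp_all [PySem.Dict.insert, PySem.Dict.contains]
  split <;> simp

-- proof-only version of A's loop body, taking the pair (index, value) directly
def stepP (st : Int × PySem.Dict Int Int × PySem.Dict Int Int × Option Int × Option Int)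
    (p : Int × Int) : Int × PySem.Dict Int Int × PySem.Dict Int Int × Option Int × Option Int :=
  let (negNums, zeros, negatives, firstNeg, lastNeg) := st
  if p.2 < 0 then
    let firstNeg := if negatives.size == 0 then some p.1 else firstNeg
    (negNums + 1, zeros, negatives.insert p.1 0, firstNeg, some p.1)
  else if p.2 == 0 then
    (negNums, zeros.insert p.1 0, negatives, firstNeg, lastNeg)
  else
    (negNums, zeros, negatives, firstNeg, lastNeg)

theorem stepP_eq (nums : List Int) (st : Int × PySem.Dict Int Int × PySem.Dict Int Int × Option Int × Option Int)
    (i : Int) : getnegsStep nums st i = stepP st (i, PySem.List.pyGetD nums i 0) := by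
  rcases st with ⟨a, b, c, d, e⟩; rfl

-- main invariant, by reverse induction on the list
theorem getnegs_fold_spec (xs : List Int) :
    let E := PySem.List.enumerate xs 0
    let st := E.foldl stepP ((0 : Int), PySem.Dict.empty, PySem.Dict.empty, none, none)
    st.1 = ((xs.filter (fun x => decide (x < 0))).map (fun _ => (1 : Int))).sum ∧
    st.2.2.2.1 = (E.find? (fun p => decide (p.2 < 0))).map (fun p => p.1) ∧
    st.2.2.2.2 = (E.reverse.find? (fun p => decide (p.2 < 0))).map (fun p => p.1) ∧
    (st.2.2.1.items = [] ↔ E.find? (fun p => decide (p.2 < 0)) = none) := by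
  induction xs using List.reverseRecOn with
  | nil => simp [PySem.List.enumerate, PySem.Dict.empty]
  | append_singleton ys x ih =>
    obtain ⟨h1, h2, h3, h4⟩ := ih
    simp only [PySem.List.enumerate_append, List.foldl_append, List.filter_append,
      List.map_append, List.sum_append, List.reverse_append, List.find?_append]
    have hx1 : PySem.List.enumerate [x] (0 + (ys.length : Int)) = [((ys.length : Int), x)] := by
      simp [PySem.List.enumerate]
    rw [hx1]
    set st := List.foldl stepP ((0 : Int), PySem.Dict.empty, PySem.Dict.empty,
      (none : Option Int), (none : Option Int)) (PySem.List.enumerate ys) with hst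
    obtain ⟨cnt, z, g, fi, la⟩ := st
    dsimp only at h1 h2 h3 h4
    simp only [List.foldl_cons, List.foldl_nil]
    by_cases hx : x < 0
    · by_cases hg : g.items = []
      · have hf := h4.mp hg
        have hgsz : (g.size == 0) = true := by simp [PySem.Dict.size, hg]
        refine ⟨?_, ?_, ?_, ?_⟩ <;>
          simp [stepP, hgsz, hx, hf, h1, items_insert_ne_nil]
      · have hf : List.find? (fun p => decide (p.2 < 0)) (PySem.List.enumerate ys) ≠ none := by
          intro h; exact hg (h4.mpr h)
        obtain ⟨p, hp⟩ := Option.ne_none_iff_exists'.mp hf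
        have hgsz : (g.size == 0) = false := by
          simp [PySem.Dict.size, List.length_eq_zero_iff, hg]
        refine ⟨?_, ?_, ?_, ?_⟩ <;>
          simp [stepP, hgsz, hx, hp, h1, h2, items_insert_ne_nil]
    · have hfind : List.find? (fun p : Int × Int => decide (p.2 < 0)) [((ys.length : Int), x)] = none := by
        simp; omega
      rw [hfind]
      simp only [Option.or_none]
      by_cases hz : x = 0
      · refine ⟨?_, ?_, ?_, ?_⟩ <;> simp [stepP, hz, h1, h2, h3, h4]
      · refine ⟨?_, ?_, ?_, ?_⟩ <;> simp [stepP, hx, hz, h1, h2, h3, h4]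


theorem getnegs_eq (nums : List Int) : getnegs nums = getnegs_alt nums := by
  obtain ⟨h1, h2, h3, h4⟩ := getnegs_fold_spec nums
  have hfun : getnegsStep nums = fun st p => stepP st (p, PySem.List.pyGetD nums p 0) := by
    funext st i; exact stepP_eq nums st i
  have hrange : PySem.List.pyRange (PySem.List.len nums - 1) (-1) (-1)
      = (PySem.List.pyRange 0 (PySem.List.len nums) 1).reverse := by
    rw [PySem.List.pyRange_neg_one_eq_reverse]; norm_num
  have hEnum : PySem.List.enumerate nums 0
      = (PySem.List.pyRange 0 (PySem.List.len nums) 1).map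
          (fun j => (j, PySem.List.pyGetD nums j 0)) := by
    simpa using PySem.List.enumerate_eq_map_pyRange (xs := nums) (d := 0)
  have hfold : (PySem.List.pyRange 0 (PySem.List.len nums) 1).foldl (getnegsStep nums)
        ((0 : Int), PySem.Dict.empty, PySem.Dict.empty, none, none)
      = (PySem.List.enumerate nums 0).foldl stepP
        ((0 : Int), PySem.Dict.empty, PySem.Dict.empty, none, none) := by
    rw [hfun, hEnum, List.foldl_map]
  have hlast : (PySem.List.pyRange (PySem.List.len nums - 1) (-1) (-1)).find?
        (fun i => decide (PySem.List.pyGetD nums i 0 < 0))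
      = Option.map (fun p => p.1)
          ((PySem.List.enumerate nums 0).reverse.find? (fun p => decide (p.2 < 0))) := by
    rw [hrange, hEnum, ← List.map_reverse, List.find?_map, Option.map_map]
    simp only [Function.comp_def]
    simp
  unfold getnegs getnegs_alt
  simp only [hfold, h1, h2, h3, hlast]

-- ===== VERDICT (by name: the statement is the Claim_ definition above) =====
theorem getnegs_spec : Claim_equal_getnegs := by
  intro nums _
  unfold Spec_getnegs
  exact getnegs_eq nums
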